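-- pv_equiv track=rewrite | github.com/tempflip/math_labs | lab3/task5.py | trinominal
-- ===== SOURCE A (Python) =====
-- def trinominal(n): # iterative implementation
-- 	tri = [[1]]
--
-- 	for i in range(n-1):
-- 		row = [1] # first element always 1
-- 		for j in range(len(tri[-1])): # lenght of the inner row is the lenght of the previous row
-- 			if (j != 0):
-- 				a = tri[-1][j-1]
-- 			else : a = 0 # if out of range
-- 			b = tri[-1][j]
--
-- 			if j != len(tri[-1]) -1:
-- 				c = tri[-1][j+1]
-- 			else : c = 0 # if out of range
--
-- 			el = a+b+c # the element is j-1 + j + j+1 of previous row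
-- 			row.append(el)
-- 		row.append(1) # last element always 1
-- 		tri.append(row)
-- 	return tri
-- ===== SOURCE B (Python) =====
-- def trinominal(n):
--     # Each row is computed independently of the previous rows: row i holds the
--     # coefficients of (1 + x + x^2)**i, generated left-to-right with the D-finite
--     # recurrence (k+1)*T(k+1) = (i-k)*T(k) + (2*i-k+1)*T(k-1), which follows from
--     # (1+x+x^2)*f' = i*(1+2x)*f; the division below is always exact.
--     rows = n if n > 1 else 1
--     tri = []
--     for i in range(rows):
--         row = [1]
--         for k in range(2 * i):
--             t0 = row[k - 1] if k > 0 else 0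
--             row.append(((i - k) * row[k] + (2 * i - k + 1) * t0) // (k + 1))
--         tri.append(row)
--     return tri
-- ===== Notes on version B (the rewrite author's own statement) =====
-- stated objective: alternative
-- what changed: B abandons A's row-from-previous-row sum-of-three-neighbours recurrence: each row is computed independently, left-to-right, from the D-finite recurrence (k+1)*T(k+1) = (i-k)*T(k) + (2i-k+1)*T(k-1) (derived from (1+x+x^2)*f' = i*(1+2x)*f for f=(1+x+x^2)^i), using multiplication and exact integer division instead of additions of the row above.
import Mathlib
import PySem

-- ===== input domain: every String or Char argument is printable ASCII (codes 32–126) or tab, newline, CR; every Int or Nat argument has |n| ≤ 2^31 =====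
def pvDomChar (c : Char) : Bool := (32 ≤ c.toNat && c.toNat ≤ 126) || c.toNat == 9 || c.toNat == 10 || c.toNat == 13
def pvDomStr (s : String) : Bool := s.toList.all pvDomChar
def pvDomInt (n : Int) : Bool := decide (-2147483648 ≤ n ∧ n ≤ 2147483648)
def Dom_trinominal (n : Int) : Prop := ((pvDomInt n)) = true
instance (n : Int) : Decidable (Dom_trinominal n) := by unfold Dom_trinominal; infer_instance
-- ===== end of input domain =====

-- B computes each row independently of the previous rows, left-to-right from the
-- D-finite recurrence (k+1)·T(k+1) = (i−k)·T(k) + (2i−k+1)·T(k−1); same values, different algorithm.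

-- ===== PORT A =====
-- inner loop body of A: row starts as [1], each el is appended, then a final 1 is appended.
-- all list indices A uses are in range (the j==0 / j==last branches guard the edges), so
-- List.getD totalizes them without changing the computed value.
def stepA (prev : List Int) : List Int :=
  ((List.range prev.length).foldl (fun row j =>
      row ++ [(if j ≠ 0 then prev.getD (j-1) 0 else 0) + prev.getD j 0 +
              (if j ≠ prev.length - 1 then prev.getD (j+1) 0 else 0)]) [1]) ++ [1]

def trinominal (n : Int) : List (List Int) :=
  (PySem.List.pyRange 0 (n-1) 1).foldl
    (fun tri _ => tri ++ [stepA (PySem.List.pyGetD tri (-1) [])]) [[1]]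

-- ===== PORT B =====
-- B's inner loop: row starts as [1]; each appended element comes from the two
-- elements already in the row via the exact recurrence; // is exact here.
def rowB (i : Int) : List Int :=
  (PySem.List.pyRange 0 (2*i) 1).foldl
    (fun row k =>
      row ++ [PySem.Int.floordiv
        ((i - k) * PySem.List.pyGetD row k 0 +
         (2*i - k + 1) * (if k > 0 then PySem.List.pyGetD row (k-1) 0 else 0)) (k + 1)]) [1]

def trinominal_alt (n : Int) : List (List Int) :=
  (PySem.List.pyRange 0 (if n > 1 then n else 1) 1).map (fun i => rowB i)

-- ===== PRECONDITION & SPEC =====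
def Spec_trinominal (n : Int) (out : List (List Int)) : Prop := out = trinominal_alt n
instance (n : Int) (out : List (List Int)) : Decidable (Spec_trinominal n out) := by unfold Spec_trinominal; infer_instance

-- ===== CLAIM (what is proved, stated in full; the proofs are below) =====
def Claim_equal_trinominal : Prop := ∀ (n : Int), Dom_trinominal n → Spec_trinominal n (trinominal n)

-- ===== LEMMAS AND PROOFS =====

-- the trinomial coefficient: row i, column k of the triangle
def Tri : Nat → Int → Int
  | 0, k => if k = 0 then 1 else 0
  | (i+1), k => Tri i (k-2) + Tri i (k-1) + Tri i k

theorem Tri_succ (i : Nat) (k : Int) : Tri (i+1) k = Tri i (k-2) + Tri i (k-1) + Tri i k := rfl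

theorem Tri_neg (i : Nat) : ∀ k : Int, k < 0 → Tri i k = 0 := by
  induction i with
  | zero => intro k hk; simp only [Tri]; rw [if_neg (by omega)]
  | succ i ih =>
    intro k hk
    rw [Tri_succ, ih _ (by omega), ih _ (by omega), ih _ (by omega)]
    ring

theorem Tri_hi (i : Nat) : ∀ k : Int, (2*(i:Int)) < k → Tri i k = 0 := by
  induction i with
  | zero => intro k hk; simp only [Tri]; rw [if_neg (by omega)]
  | succ i ih =>
    intro k hk
    push_cast at hk
    rw [Tri_succ, ih _ (by omega), ih _ (by omega), ih _ (by omega)]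
    ring

theorem Tri_zero (i : Nat) : Tri i 0 = 1 := by
  induction i with
  | zero => simp [Tri]
  | succ i ih =>
    rw [Tri_succ, ih, Tri_neg i _ (by omega), Tri_neg i _ (by omega)]
    ring

theorem Tri_top (i : Nat) : Tri i ((2*i : Nat) : Int) = 1 := by
  induction i with
  | zero => simp [Tri]
  | succ i ih =>
    rw [Tri_succ]
    have h1 : ((2*(i+1) : Nat) : Int) - 2 = ((2*i : Nat) : Int) := by push_cast; ring
    rw [h1, ih, Tri_hi i _ (by push_cast; omega), Tri_hi i _ (by push_cast; omega)]
    ring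

-- the along-the-row recurrence B relies on, from (1+x+x²)·f' = i·(1+2x)·f
theorem Tri_rec (i : Nat) : ∀ k : Int,
    (k+1) * Tri i (k+1) = ((i:Int) - k) * Tri i k + (2*(i:Int) - k + 1) * Tri i (k-1) := by
  induction i with
  | zero =>
    intro k
    simp only [Tri, Nat.cast_zero]
    split_ifs <;> [skip; skip; skip; skip; skip; skip; skip; skip] <;> nlinarith [sq_nonneg k]
  | succ i ih =>
    intro k
    have hA := ih k
    have hB := ih (k-1)
    have hC := ih (k-2)
    rw [show k-1+1 = k by ring, show k-1-1 = k-2 by ring] at hB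
    rw [show k-2+1 = k-1 by ring, show k-2-1 = k-3 by ring] at hC
    rw [Tri_succ, Tri_succ, Tri_succ,
      show k+1-2 = k-1 by ring, show k+1-1 = k by ring,
      show k-1-2 = k-3 by ring, show k-1-1 = k-2 by ring]
    push_cast
    linear_combination hA + hB + hC

-- row t of the triangle
def rowT (t : Nat) : List Int := (List.range (2*t+1)).map (fun k : Nat => Tri t (k:Int))

theorem rowT_getD (t j : Nat) : (rowT t).getD j 0 = if j < 2*t+1 then Tri t (j:Int) else 0 := by
  by_cases h : j < 2*t+1
  · rw [if_pos h]
    simp only [rowT, List.getD_eq_getElem?_getD, List.getElem?_map, List.getElem?_range h,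
      Option.map_some, Option.getD_some]
  · rw [if_neg h]
    apply List.getD_eq_default
    simp only [rowT, List.length_map, List.length_range]
    omega

theorem rowT_length (t : Nat) : (rowT t).length = 2*t+1 := by simp [rowT]

-- A's inner loop in closed form (foldl-append = map)
theorem foldl_snoc_map (f : Nat → Int) (l : List Nat) (init : List Int) :
    l.foldl (fun row j => row ++ [f j]) init = init ++ l.map f := by
  induction l generalizing init with
  | nil => simp
  | cons x xs ih => simp [List.foldl_cons, ih, List.append_assoc]

theorem stepA_eq_map (prev : List Int) :
    stepA prev = 1 :: ((List.range prev.length).map (fun j =>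
      (if j ≠ 0 then prev.getD (j-1) 0 else 0) + prev.getD j 0 +
      (if j ≠ prev.length - 1 then prev.getD (j+1) 0 else 0)) ++ [1]) := by
  unfold stepA
  rw [foldl_snoc_map]
  rfl

theorem stepA_row (t : Nat) : stepA (rowT t) = rowT (t+1) := by
  rw [stepA_eq_map, rowT_length]
  have hrhs : rowT (t+1)
      = Tri (t+1) 0 :: ((List.range (2*t+1)).map (fun j : Nat => Tri (t+1) ((j:Int)+1))
          ++ [Tri (t+1) (((2*(t+1) : Nat)) : Int)]) := by
    rw [rowT, show 2*(t+1)+1 = ((2*t+1) + 1) + 1 by ring, List.range_succ,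
      List.range_succ_eq_map]
    simp only [List.map_append, List.map_cons, List.map_map, List.map_nil, List.cons_append,
      Nat.cast_zero]
    refine congrArg₂ List.cons rfl (congrArg₂ (· ++ ·) ?_ ?_)
    · apply List.map_congr_left
      intro j _
      simp only [Function.comp, Nat.succ_eq_add_one]
      congr 1
    · simp only [List.cons.injEq, and_true]
      congr 1
  rw [hrhs]
  refine congrArg₂ List.cons ?_ (congrArg₂ (· ++ ·) ?_ ?_)
  · rw [Tri_zero]
  · apply List.map_congr_left
    intro j hj
    simp only [List.mem_range] at hj
    rw [Tri_succ]
    have hb : (rowT t).getD j 0 = Tri t (j:Int) := by rw [rowT_getD, if_pos hj]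
    have ha : (if j ≠ 0 then (rowT t).getD (j-1) 0 else 0) = Tri t ((j:Int)+1-2) := by
      by_cases h0 : j = 0
      · subst h0
        rw [if_neg (by omega)]
        exact (Tri_neg t _ (by omega)).symm
      · rw [if_pos h0, rowT_getD, if_pos (by omega)]
        congr 1
        omega
    have hc : (if j ≠ 2*t+1-1 then (rowT t).getD (j+1) 0 else 0) = Tri t ((j:Int)+1) := by
      by_cases hl : j = 2*t
      · rw [if_neg (by omega)]
        exact (Tri_hi t _ (by omega)).symm
      · rw [if_pos (by omega), rowT_getD, if_pos (by omega)]
        congr 1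
    rw [show (j:Int)+1-1 = (j:Int) by ring, ha, hb, hc]
  · rw [Tri_top]

-- the fold of A keeps producing rows of the triangle
theorem fold_rows (l : List Int) : ∀ t : Nat,
    l.foldl (fun tri _ => tri ++ [stepA (PySem.List.pyGetD tri (-1) [])])
      ((List.range (t+1)).map rowT)
      = (List.range (t+1+l.length)).map rowT := by
  induction l with
  | nil => intro t; simp
  | cons x xs ih =>
    intro t
    simp only [List.foldl_cons]
    have hlast : PySem.List.pyGetD ((List.range (t+1)).map rowT) (-1) [] = rowT t := by
      rw [List.range_succ, List.map_append]
      rw [show List.map rowT [t] = [rowT t] from rfl, PySem.List.pyGetD_neg_one_append_singleton]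
    have hsnoc : (List.range (t+1)).map rowT ++ [rowT (t+1)]
        = (List.range (t+1+1)).map rowT := by
      conv_rhs => rw [List.range_succ, List.map_append]
      rfl
    rw [hlast, stepA_row, hsnoc, ih (t+1),
      show t+1+1+xs.length = t+1+(x :: xs).length by simp; omega]

-- python range(m) as a mapped Lean range
theorem pyRange_natCast (m : Nat) :
    PySem.List.pyRange 0 ((m:Nat):Int) 1 = (List.range m).map (fun k : Nat => (k:Int)) := by
  rw [PySem.List.pyRange_one]
  simp

-- B's inner loop builds row t one exact division at a time
theorem rowB_loop (t : Nat) : ∀ m : Nat, m ≤ 2*t →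
    ((List.range m).map (fun k : Nat => (k:Int))).foldl
      (fun row k =>
        row ++ [PySem.Int.floordiv
          (((t:Int) - k) * PySem.List.pyGetD row k 0 +
           (((2*t:Nat):Int) - k + 1) * (if k > 0 then PySem.List.pyGetD row (k-1) 0 else 0)) (k + 1)]) [1]
      = (List.range (m+1)).map (fun k : Nat => Tri t (k:Int)) := by
  have hget : ∀ (L j : Nat), j < L →
      ((List.range L).map (fun k : Nat => Tri t (k:Int))).getD j 0 = Tri t (j:Int) := by
    intro L j hj
    simp only [List.getD_eq_getElem?_getD, List.getElem?_map, List.getElem?_range hj,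
      Option.map_some, Option.getD_some]
  intro m
  induction m with
  | zero =>
    intro _
    simp [Tri_zero]
  | succ m ih =>
    intro hm
    rw [List.range_succ, List.map_append, List.foldl_append, ih (by omega),
      show List.map (fun k : Nat => (k:Int)) [m] = [((m:Nat):Int)] from rfl,
      List.foldl_cons, List.foldl_nil]
    have h1 : PySem.List.pyGetD ((List.range (m+1)).map (fun k : Nat => Tri t (k:Int))) ((m:Nat):Int) 0
        = Tri t (m:Int) := by
      rw [PySem.List.pyGetD_natCast]
      exact hget _ _ (by omega)
    have h2 : (if ((m:Nat):Int) > 0 then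
          PySem.List.pyGetD ((List.range (m+1)).map (fun k : Nat => Tri t (k:Int))) (((m:Nat):Int)-1) 0
        else 0) = Tri t ((m:Int)-1) := by
      by_cases h0 : m = 0
      · subst h0
        rw [if_neg (by omega)]
        exact (Tri_neg t _ (by omega)).symm
      · rw [if_pos (by omega), show ((m:Nat):Int)-1 = (((m-1:Nat)):Int) by omega,
          PySem.List.pyGetD_natCast]
        rw [hget _ _ (by omega)]
    rw [h1, h2, show ((2*t:Nat):Int) = 2*(t:Int) by push_cast; ring,
      show ((t:Int) - (m:Int)) * Tri t (m:Int) + (2*(t:Int) - (m:Int) + 1) * Tri t ((m:Int)-1)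
          = ((m:Int)+1) * Tri t ((m:Int)+1) from (Tri_rec t (m:Int)).symm,
      PySem.Int.floordiv_eq_ediv_of_pos (by positivity),
      Int.mul_ediv_cancel_left _ (by omega)]
    have hlastel : Tri t ((m:Int)+1) = Tri t (((m+1:Nat)):Int) := by congr 1
    rw [hlastel]
    conv_rhs => rw [List.range_succ, List.map_append]
    rfl

theorem rowB_eq (t : Nat) : rowB ((t:Nat):Int) = rowT t := by
  unfold rowB
  rw [show 2*((t:Nat):Int) = ((2*t : Nat):Int) by push_cast; ring, pyRange_natCast]
  rw [rowB_loop t (2*t) le_rfl]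
  rfl

theorem alt_eq (n : Int) :
    trinominal_alt n = (List.range ((if n > 1 then n else 1).toNat)).map rowT := by
  unfold trinominal_alt
  rw [show (if n > 1 then n else 1) = (((if n > 1 then n else 1).toNat : Nat) : Int) by
      split_ifs <;> omega,
    pyRange_natCast, List.map_map]
  apply List.map_congr_left
  intro t _
  simp only [Function.comp]
  exact rowB_eq t

-- ===== VERDICT (by name: the statement is the Claim_ definition above) =====
theorem trinominal_spec : Claim_equal_trinominal := by
  intro n _
  unfold Spec_trinominal trinominal
  rw [show ([[1]] : List (List Int)) = (List.range (0+1)).map rowT by decide,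
    fold_rows _ 0, alt_eq]
  congr 1
  rw [PySem.List.length_pyRange_one]
  congr 1
  split_ifs <;> omega
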